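-- pv_equiv track=rewrite | github.com/j9972/algorithm | 프로그래머스/스킬트리.py | solution
-- ===== SOURCE A (Python) =====
-- def solution(skill, skill_trees):
--     cnt = 0
--     ans = []
--
--     for tree in skill_trees:
--         str1 = ""
--         for data in tree:
--             if data in skill:
--                 str1 += data
--             else:
--                 continue
--         ans.append(str1)
--
--     for i in ans:
--         if skill[:len(i)] == i:
--             cnt += 1
--         else:
--             continue
--     return cnt
-- ===== SOURCE B (Python) =====
-- def solution(skill, skill_trees):
--     cnt = 0
--     for tree in skill_trees:
--         p = 0
--         ok = True
--         for c in tree: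
--             if c in skill:
--                 if p < len(skill) and skill[p] == c:
--                     p += 1
--                 else:
--                     ok = False
--                     break
--         if ok:
--             cnt += 1
--     return cnt
-- ===== Notes on version B (the rewrite author's own statement) =====
-- stated objective: faster
-- what changed: Instead of building the filtered string for every tree and then comparing it with a skill prefix by slicing, B keeps a single integer pointer into skill per tree and fails fast on the first out-of-order skill letter, never materialising intermediate strings or the ans list.
import Mathlib
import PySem

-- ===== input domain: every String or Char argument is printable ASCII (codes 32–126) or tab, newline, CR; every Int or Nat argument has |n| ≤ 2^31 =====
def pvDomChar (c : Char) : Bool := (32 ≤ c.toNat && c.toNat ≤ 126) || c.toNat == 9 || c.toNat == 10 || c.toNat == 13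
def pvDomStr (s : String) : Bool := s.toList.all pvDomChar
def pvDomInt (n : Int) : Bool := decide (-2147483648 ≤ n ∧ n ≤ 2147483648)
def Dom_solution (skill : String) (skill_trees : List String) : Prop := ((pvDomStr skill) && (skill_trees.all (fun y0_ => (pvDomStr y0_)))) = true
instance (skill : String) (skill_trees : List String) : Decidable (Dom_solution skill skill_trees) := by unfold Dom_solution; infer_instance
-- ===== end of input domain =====

-- B replaces A's build-filtered-string-then-slice-compare with a single per-tree pass
-- keeping an integer pointer into skill with early exit (objective: simpler).


-- ===== PORT A =====
-- first loop: build ans, the filtered string (as List Char) of each tree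
-- ('data in skill' on a single char = char membership)
def solution (skill : String) (skill_trees : List String) : Int :=
  let ans : List (List Char) :=
    skill_trees.foldl (fun ans tree =>
      ans ++ [tree.toList.foldl
        (fun str1 data => if skill.toList.contains data then str1 ++ [data] else str1) []]) []
  -- second loop: skill[:len(i)] == i  (slice with 0 ≤ len i = take)
  ans.foldl (fun cnt i => if skill.toList.take i.length == i then cnt + 1 else cnt) 0

-- ===== PORT B =====
-- inner loop of Source B: pointer p into skill, early exit (false) on first violation
def pvWalk (skill : List Char) : List Char → Nat → Bool
  | [], _ => true
  | c :: rest, p =>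
    if skill.contains c then
      if p < skill.length && skill.getD p ' ' == c then pvWalk skill rest (p + 1)
      else false
    else pvWalk skill rest p

def solution_alt (skill : String) (skill_trees : List String) : Int :=
  skill_trees.foldl (fun cnt tree =>
    if pvWalk skill.toList tree.toList 0 then cnt + 1 else cnt) 0

-- ===== PRECONDITION & SPEC =====
def Spec_solution (skill : String) (skill_trees : List String) (out : Int) : Prop := out = solution_alt skill skill_trees
instance (skill : String) (skill_trees : List String) (out : Int) : Decidable (Spec_solution skill skill_trees out) := by unfold Spec_solution; infer_instance

-- ===== CLAIM (what is proved, stated in full; the proofs are below) =====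
def Claim_equal_solution : Prop := ∀ (skill : String) (skill_trees : List String), Dom_solution skill skill_trees → Spec_solution skill skill_trees (solution skill skill_trees)

-- ===== LEMMAS AND PROOFS =====

-- A's inner foldl builds acc ++ filter
theorem pvFoldFilter (s : List Char) (t : List Char) (acc : List Char) :
    t.foldl (fun str1 data => if s.contains data then str1 ++ [data] else str1) acc
      = acc ++ t.filter (fun d => s.contains d) := by
  induction t generalizing acc with
  | nil => simp
  | cons c rest ih =>
    simp only [List.foldl, List.filter_cons]
    rw [ih]
    by_cases h : c ∈ s <;> simp [h]

-- the pointer walk from p succeeds iff the filtered tree is a prefix of skill.drop p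
theorem pvWalk_eq (s : List Char) (t : List Char) (p : Nat) :
    pvWalk s t p
      = ((s.drop p).take (t.filter (fun d => s.contains d)).length
          == t.filter (fun d => s.contains d)) := by
  induction t generalizing p with
  | nil => simp [pvWalk]
  | cons c rest ih =>
    by_cases hc : c ∈ s
    · simp only [pvWalk, List.contains_eq_mem, hc, decide_true, if_pos, List.filter_cons,
        List.length_cons]
      by_cases hp : p < s.length
      · have hdrop : s.drop p = s[p] :: s.drop (p + 1) :=
          List.drop_eq_getElem_cons hp
        have hgetD : s.getD p ' ' = s[p] := List.getD_eq_getElem s ' ' hp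
        have hdec : decide (p < s.length) = true := decide_eq_true hp
        by_cases he : s[p] = c
        · have hb : (decide (p < s.length) && (s.getD p ' ' == c)) = true := by
            rw [hdec, Bool.true_and, hgetD]
            exact beq_iff_eq.mpr he
          rw [if_pos hb, ih, hdrop]
          simp [he]
        · have hb : (decide (p < s.length) && (s.getD p ' ' == c)) = false := by
            rw [hdec, Bool.true_and, hgetD]
            exact beq_eq_false_iff_ne.mpr he
          rw [if_neg (by rw [hb]; exact Bool.false_ne_true), hdrop, List.take_succ_cons]
          simp [he]
      · have hb : (decide (p < s.length) && (s.getD p ' ' == c)) = false := by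
          rw [decide_eq_false hp, Bool.false_and]
        rw [if_neg (by rw [hb]; exact Bool.false_ne_true)]
        rw [List.drop_eq_nil_of_le (le_of_not_gt hp)]
        simp
    · simp only [pvWalk, List.contains_eq_mem, hc, decide_false, if_neg, Bool.false_eq_true,
        not_false_eq_true, List.filter_cons]
      simpa using ih p

-- per-tree agreement of the two counted predicates
theorem pvPred (s : List Char) (t : List Char) :
    (s.take (t.filter (fun d => s.contains d)).length
        == t.filter (fun d => s.contains d)) = pvWalk s t 0 := by
  rw [pvWalk_eq]; simp

-- A's first loop produces the map of filters
theorem pvAns (s : List Char) (trees : List String) (acc : List (List Char)) :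
    trees.foldl (fun ans tree =>
        ans ++ [tree.toList.foldl
          (fun str1 data => if s.contains data then str1 ++ [data] else str1) []]) acc
      = acc ++ trees.map (fun tree => tree.toList.filter (fun d => s.contains d)) := by
  induction trees generalizing acc with
  | nil => simp
  | cons t rest ih =>
    simp only [List.foldl, List.map]
    rw [ih, pvFoldFilter]
    simp

-- counting over the mapped list = counting over trees with composed predicate
theorem pvCount (s : List Char) (trees : List String) (cnt : Int) :
    (trees.map (fun tree => tree.toList.filter (fun d => s.contains d))).foldl
        (fun cnt i => if s.take i.length == i then cnt + 1 else cnt) cnt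
      = trees.foldl (fun cnt tree => if pvWalk s tree.toList 0 then cnt + 1 else cnt) cnt := by
  induction trees generalizing cnt with
  | nil => rfl
  | cons t rest ih => simp only [List.map, List.foldl, pvPred, ih]

-- ===== VERDICT (by name: the statement is the Claim_ definition above) =====
theorem solution_spec : Claim_equal_solution := by
  intro skill skill_trees _
  unfold Spec_solution solution solution_alt
  rw [pvAns, List.nil_append, pvCount]
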